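-- pv_equiv track=rewrite | github.com/mohammadnaeimi/qinforemation | Quantum_information.py | Clossest
-- ===== SOURCE A (Python) =====
-- def Clossest(input):
--     t = []
--     x = input
--     if x == 0:
--         return 0
--     else:
--         while x != 1:
--             t.append(2)
--             m, trash = divmod(x, 2)
--             x = m
--         res = 2 ** (len(t))
--     return res
-- ===== SOURCE B (Python) =====
-- def Clossest(input):
--     if input == 0:
--         return 0
--     res = 1
--     while res * 2 <= input:
--         res *= 2
--     return res
-- ===== Notes on version B (the rewrite author's own statement) =====
-- stated objective: simpler
-- what changed: B builds the answer upward (doubling a running power of two while it still fits) instead of A's tearing the input down by repeated halving into a list and exponentiating its length at the end.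
import Mathlib
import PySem

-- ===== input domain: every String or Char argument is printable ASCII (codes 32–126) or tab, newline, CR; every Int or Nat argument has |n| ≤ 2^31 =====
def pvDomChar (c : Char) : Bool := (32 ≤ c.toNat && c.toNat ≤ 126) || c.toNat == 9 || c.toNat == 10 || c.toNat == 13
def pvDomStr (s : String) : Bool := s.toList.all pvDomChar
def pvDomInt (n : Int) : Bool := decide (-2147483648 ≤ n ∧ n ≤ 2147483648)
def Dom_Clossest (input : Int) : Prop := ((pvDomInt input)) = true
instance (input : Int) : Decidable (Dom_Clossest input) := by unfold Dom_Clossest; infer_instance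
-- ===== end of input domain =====

-- B replaces A's halve-and-count-then-exponentiate loop by doubling a running power of two upward; objective: simpler.

-- ===== PORT A =====
-- A's while loop: append 2 to t and halve x until x == 1.  The guard `x ≤ 1`
-- only totalizes the recursion (Python diverges on negatives and zero never reaches the loop; negatives are excluded by Pre_).
def ClossestLoop (x : Int) (t : List Int) : List Int :=
  if x ≤ 1 then t
  else ClossestLoop (PySem.Int.floordiv x 2) (t ++ [2])
  termination_by x.toNat
  decreasing_by
    rw [PySem.Int.floordiv_eq_ediv_of_pos (by omega)]
    omega

def Clossest (input : Int) : Int :=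
  if input = 0 then 0
  else (2 : Int) ^ (ClossestLoop input []).length

-- ===== PORT B =====
-- B's while loop: double res while res * 2 ≤ input.  The `0 < res` conjunct
-- only totalizes the recursion (in Source B res is always positive).
def ClossestAltLoop (input res : Int) : Int :=
  if 0 < res ∧ res * 2 ≤ input then ClossestAltLoop input (res * 2)
  else res
  termination_by (input - res).toNat
  decreasing_by omega

def Clossest_alt (input : Int) : Int :=
  if input = 0 then 0
  else ClossestAltLoop input 1

-- ===== PRECONDITION & SPEC =====
-- Pre_ excludes negative inputs: there A's while loop never reaches 1 and the
-- Python A diverges (returns nothing), while B returns 1.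
def Pre_Clossest (input : Int) : Prop := 0 ≤ input
instance (input : Int) : Decidable (Pre_Clossest input) := by unfold Pre_Clossest; infer_instance
def pvWitness_Clossest : Int := 6

def Spec_Clossest (input : Int) (out : Int) : Prop := out = Clossest_alt input
instance (input : Int) (out : Int) : Decidable (Spec_Clossest input out) := by unfold Spec_Clossest; infer_instance

-- ===== CLAIM (what is proved, stated in full; the proofs are below) =====
def Claim_equal_Clossest : Prop := ∀ (input : Int), Dom_Clossest input → Pre_Clossest input → Spec_Clossest input (Clossest input)

-- ===== LEMMAS AND PROOFS =====

-- A's loop counts ⌊log₂ x⌋ halvings.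
theorem ClossestLoop_length (x : Int) (t : List Int) (hx : 1 ≤ x) :
    (ClossestLoop x t).length = t.length + Nat.log 2 x.toNat := by
  fun_induction ClossestLoop x t with
  | case1 x t h =>
      have : x = 1 := by omega
      simp [this]
  | case2 x t h ih =>
      rw [PySem.Int.floordiv_eq_ediv_of_pos (by omega)] at *
      have hx2 : (1 : Int) ≤ x / 2 := by omega
      rw [ih hx2]
      have hdiv : (x / 2).toNat = x.toNat / 2 := by omega
      have h2 : 2 ≤ x.toNat := by omega
      have hlog : Nat.log 2 (x.toNat / 2) = Nat.log 2 x.toNat - 1 := Nat.log_div_base _ _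
      have hpos : 0 < Nat.log 2 x.toNat := Nat.log_pos (by omega) h2
      simp [hdiv, hlog]
      omega

-- B's loop returns res·2^k sandwiched between input and its double.
theorem ClossestAltLoop_sandwich (input res : Int) (hres : 0 < res) (hle : res ≤ input) :
    ∃ k : Nat, ClossestAltLoop input res = res * 2 ^ k ∧
      res * 2 ^ k ≤ input ∧ input < res * 2 ^ (k + 1) := by
  fun_induction ClossestAltLoop input res with
  | case1 res h ih =>
      obtain ⟨k, hk, hk1, hk2⟩ := ih (by omega) h.2
      exact ⟨k + 1, by rw [hk]; ring, by rw [pow_succ]; linarith [hk1], by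
        calc input < res * 2 * 2 ^ (k + 1) := hk2
        _ = res * 2 ^ (k + 1 + 1) := by ring⟩
  | case2 res h =>
      refine ⟨0, by simp, by simpa using hle, ?_⟩
      have : ¬ res * 2 ≤ input := by tauto
      have hpow : res * 2 ^ (0 + 1) = res * 2 := by ring
      omega

-- ===== VERDICT (by name: the statement is the Claim_ definition above) =====
theorem Clossest_spec : Claim_equal_Clossest := by
  intro input _ hpre
  unfold Spec_Clossest Clossest Clossest_alt
  by_cases h0 : input = 0
  · simp [h0]
  · simp only [if_neg h0]
    have hx : (1 : Int) ≤ input := by unfold Pre_Clossest at hpre; omega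
    rw [ClossestLoop_length input [] hx]
    obtain ⟨k, hk, hk1, hk2⟩ := ClossestAltLoop_sandwich input 1 one_pos hx
    simp only [one_mul] at hk hk1 hk2
    have hn1 : (2 : Int) ^ k ≤ input := hk1
    have hn2 : input < (2 : Int) ^ (k + 1) := hk2
    have hc1 : ((2 ^ k : Nat) : Int) ≤ input := by push_cast; exact hn1
    have hc2 : input < ((2 ^ (k + 1) : Nat) : Int) := by push_cast; exact hn2
    have hklog : Nat.log 2 input.toNat = k :=
      Nat.log_eq_of_pow_le_of_lt_pow (by omega) (by omega)
    rw [hklog, hk]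
    simp
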